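-- pv_equiv track=rewrite | github.com/gazxxni/Algorithm-Study | ~60/55회_250509/4.py | answer
-- ===== SOURCE A (Python) =====
-- def ranking(arr):
--     n = len(arr)
--     rank = [0] * n
--     order = list(range(n))
--
--     order.sort(key=lambda i: arr[i])
--
--     r = 0
--     for i in range(n):
--         if i > 0 and arr[order[i]] != arr[order[i - 1]]:
--             r = i
--         rank[order[i]] = r
--
--     a = ' '.join(map(str, rank))
--
--     return a
--
-- def answer(arr):
--     dict_a = {}
--
--     for i in arr:
--         key = ranking(i)
--         if key in dict_a:
--             dict_a[key] += 1
--         else: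
--             dict_a[key] = 1
--
--     result = 0
--     for i in dict_a.values():
--         if i >= 2:
--             result += i * (i - 1) // 2
--
--     return result
-- ===== SOURCE B (Python) =====
-- def answer(arr):
--     counts = {}
--     for a in arr:
--         key = ' '.join(str(sum(1 for x in a if x < v)) for v in a)
--         counts[key] = counts.get(key, 0) + 1
--     return sum(c * (c - 1) // 2 for c in counts.values())
-- ===== Notes on version B (the rewrite author's own statement) =====
-- stated objective: simpler
-- what changed: The rank signature is computed by a direct count-of-strictly-smaller scan per element instead of A's sort-indices-then-scan-boundaries pass, and the grouping/summing is a get-based counter with a comprehension sum instead of A's branchy dict update and guarded accumulation loop.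
import Mathlib
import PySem

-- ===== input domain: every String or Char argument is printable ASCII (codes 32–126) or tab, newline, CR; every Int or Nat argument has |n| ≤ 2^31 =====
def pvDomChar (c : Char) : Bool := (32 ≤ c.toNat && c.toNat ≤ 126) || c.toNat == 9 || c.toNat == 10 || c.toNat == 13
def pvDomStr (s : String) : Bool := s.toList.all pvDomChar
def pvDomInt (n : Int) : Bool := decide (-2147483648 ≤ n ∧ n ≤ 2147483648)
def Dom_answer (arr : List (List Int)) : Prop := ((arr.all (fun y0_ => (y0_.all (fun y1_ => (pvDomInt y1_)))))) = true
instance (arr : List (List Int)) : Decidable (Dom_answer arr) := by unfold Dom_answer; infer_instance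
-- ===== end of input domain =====

-- B replaces A's sort-and-scan ranking with a direct count-of-strictly-smaller scan and folds the
-- grouped pair counts with a comprehension-style sum: simpler, same exact result.

-- ===== PORT A =====
-- ranking: literal port of A's helper (sort indices by value, scan for rank boundaries, join).
-- pyGetD with default 0 is exact here: every index accessed lies in range.
def ranking (a : List Int) : String :=
  let n : Int := (a.length : Int)
  let rank : List Int := List.replicate a.length 0
  let order : List Int := PySem.List.pyRange 0 n 1
  let order : List Int := PySem.List.sorted order (fun i => PySem.List.pyGetD a i 0) false
  let st : Int × List Int :=
    (PySem.List.pyRange 0 n 1).foldl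
      (fun (st : Int × List Int) i =>
        let r : Int :=
          if i > 0 ∧ ¬ (PySem.List.pyGetD a (PySem.List.pyGetD order i 0) 0
                        = PySem.List.pyGetD a (PySem.List.pyGetD order (i - 1) 0) 0)
          then i else st.1
        (r, PySem.List.pySetD st.2 (PySem.List.pyGetD order i 0) r))
      (0, rank)
  PySem.Str.join " " (st.2.map PySem.Int.toStr)

def answer (arr : List (List Int)) : Int :=
  let d : PySem.Dict String Int :=
    arr.foldl
      (fun (d : PySem.Dict String Int) i =>
        let key := ranking i
        if d.contains key then d.insert key (d.getD key 0 + 1)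
        else d.insert key 1)
      PySem.Dict.empty
  d.values.foldl
    (fun result i => if i ≥ 2 then result + PySem.Int.floordiv (i * (i - 1)) 2 else result) 0

-- ===== PORT B =====
def answer_alt (arr : List (List Int)) : Int :=
  let counts : PySem.Dict String Int :=
    arr.foldl
      (fun (d : PySem.Dict String Int) a =>
        let key := PySem.Str.join " "
          (a.map (fun v => PySem.Int.toStr
            (a.foldl (fun acc x => if x < v then acc + 1 else acc) (0 : Int))))
        d.insert key (d.getD key 0 + 1))
      PySem.Dict.empty
  (counts.values.map (fun c => PySem.Int.floordiv (c * (c - 1)) 2)).sum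

-- ===== PRECONDITION & SPEC =====
def Spec_answer (arr : List (List Int)) (out : Int) : Prop := out = answer_alt arr
instance (arr : List (List Int)) (out : Int) : Decidable (Spec_answer arr out) := by unfold Spec_answer; infer_instance

-- ===== CLAIM (what is proved, stated in full; the proofs are below) =====
def Claim_equal_answer : Prop := ∀ (arr : List (List Int)), Dom_answer arr → Spec_answer arr (answer arr)

-- ===== LEMMAS AND PROOFS =====

def pvKey (a : List Int) (i : Int) : Int := PySem.List.pyGetD a i 0
def pvS (a : List Int) : List Int :=
  PySem.List.sorted (PySem.List.pyRange 0 (a.length : Int) 1) (pvKey a) false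
def pvCC (a : List Int) (j : Int) : Int :=
  ((pvS a).countP (fun p => decide (pvKey a p < pvKey a j)) : Int)
def pvR (a : List Int) (m : Nat) : Int :=
  if m = 0 then 0 else pvCC a (PySem.List.pyGetD (pvS a) ((m : Int) - 1) 0)

theorem pvS_length (a : List Int) : (pvS a).length = a.length := by
  simp [pvS, PySem.List.length_sorted, PySem.List.length_pyRange_one]

theorem pvS_mem (a : List Int) (x : Int) : x ∈ pvS a ↔ (0 ≤ x ∧ x < (a.length : Int)) := by
  simp [pvS, PySem.List.mem_sorted, PySem.List.mem_pyRange_one]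

theorem pvS_mono (a : List Int) (p q : Nat) (hpq : p ≤ q) (hq : q < (pvS a).length) :
    pvKey a ((pvS a)[p]'(lt_of_le_of_lt hpq hq)) ≤ pvKey a ((pvS a)[q]'hq) := by
  exact PySem.List.key_sorted_getElem_mono _ _ hpq hq

theorem pvCC_eq_countP (a : List Int) (j : Int) :
    pvCC a j = (a.countP (fun x => decide (x < pvKey a j)) : Int) := by
  unfold pvCC
  congr 1
  rw [show pvS a = PySem.List.sorted (PySem.List.pyRange 0 (a.length : Int) 1) (pvKey a) false from rfl,
    List.Perm.countP_eq _ (PySem.List.sorted_perm _ _ _)]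
  have h : PySem.List.pyRange 0 (a.length : Int) 1
      = PySem.List.pyRange 0 (PySem.List.len a) 1 := by simp [PySem.List.len]
  rw [h, show (fun p => decide (pvKey a p < pvKey a j)) =
      (fun x => decide (x < pvKey a j)) ∘ (fun p => PySem.List.pyGetD a p 0) from rfl,
    ← List.countP_map, PySem.List.map_pyGetD_pyRange_zero]

theorem pvCC_congr (a : List Int) (i j : Int) (h : pvKey a i = pvKey a j) :
    pvCC a i = pvCC a j := by unfold pvCC; rw [h]

theorem pvCC_getElem_zero (a : List Int) (h0 : 0 < (pvS a).length) :
    pvCC a ((pvS a)[0]) = 0 := by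
  unfold pvCC
  have : List.countP (fun p => decide (pvKey a p < pvKey a ((pvS a)[0]))) (pvS a) = 0 := by
    rw [List.countP_eq_zero]
    intro x hx
    obtain ⟨q, hq, rfl⟩ := List.mem_iff_getElem.1 hx
    simpa using not_lt.2 (pvS_mono a 0 q (Nat.zero_le q) hq)
  simp [this]

theorem pvCC_getElem_eq (a : List Int) (m : Nat) (hm : m < (pvS a).length)
    (hlt : ∀ q (hq : q < m), pvKey a ((pvS a)[q]'(hq.trans hm)) < pvKey a ((pvS a)[m])) :
    pvCC a ((pvS a)[m]) = (m : Int) := by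
  unfold pvCC
  have hsplit : pvS a = (pvS a).take m ++ (pvS a).drop m := (List.take_append_drop m (pvS a)).symm
  rw [show List.countP (fun p => decide (pvKey a p < pvKey a ((pvS a)[m]))) (pvS a)
      = List.countP (fun p => decide (pvKey a p < pvKey a ((pvS a)[m]))) ((pvS a).take m ++ (pvS a).drop m) by rw [← hsplit]]
  rw [List.countP_append]
  have h1 : List.countP (fun p => decide (pvKey a p < pvKey a ((pvS a)[m]))) ((pvS a).take m) = m := by
    rw [List.countP_eq_length.2, List.length_take_of_le (le_of_lt hm)]
    intro x hx
    obtain ⟨q, hq, hxe⟩ := List.mem_iff_getElem.1 hx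
    have hq' : q < m := lt_of_lt_of_le hq (by simp)
    simp only [List.getElem_take] at hxe
    subst hxe
    simpa using hlt q hq'
  have h2 : List.countP (fun p => decide (pvKey a p < pvKey a ((pvS a)[m]))) ((pvS a).drop m) = 0 := by
    rw [List.countP_eq_zero]
    intro x hx
    obtain ⟨q, hq, hxe⟩ := List.mem_iff_getElem.1 hx
    rw [List.getElem_drop] at hxe
    rw [List.length_drop] at hq
    subst hxe
    simpa using not_lt.2 (pvS_mono a m (m + q) (Nat.le_add_right m q) (by omega))
  rw [h1, h2]
  simp

theorem pvGetD_s (a : List Int) (m : Nat) (hm : m < (pvS a).length) :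
    PySem.List.pyGetD (pvS a) (m : Int) 0 = (pvS a)[m] := by
  rw [PySem.List.pyGetD_natCast]; exact List.getD_eq_getElem _ _ hm

theorem pvR_succ_eq (a : List Int) (m : Nat) (hm : m < (pvS a).length) :
    pvR a (m + 1) = pvCC a ((pvS a)[m]) := by
  unfold pvR
  rw [if_neg (Nat.succ_ne_zero m)]
  congr 1
  rw [show ((m + 1 : Nat) : Int) - 1 = (m : Int) by push_cast; ring]
  exact pvGetD_s a m hm

theorem pvR_step (a : List Int) (m : Nat) (hm : m < (pvS a).length) :
    (if (m : Int) > 0 ∧ ¬ (pvKey a (PySem.List.pyGetD (pvS a) (m : Int) 0)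
        = pvKey a (PySem.List.pyGetD (pvS a) ((m : Int) - 1) 0))
     then (m : Int) else pvR a m) = pvCC a ((pvS a)[m]) := by
  match m with
  | 0 =>
    rw [if_neg (by simp)]
    unfold pvR
    rw [if_pos rfl]
    exact (pvCC_getElem_zero a hm).symm
  | Nat.succ m' =>
    have hm' : m' < (pvS a).length := by omega
    have hget : PySem.List.pyGetD (pvS a) ((m' + 1 : Nat) : Int) 0 = (pvS a)[m' + 1] :=
      pvGetD_s a (m' + 1) hm
    have hget' : PySem.List.pyGetD (pvS a) (((m' + 1 : Nat) : Int) - 1) 0 = (pvS a)[m'] := by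
      rw [show ((m' + 1 : Nat) : Int) - 1 = (m' : Int) by push_cast; ring]
      exact pvGetD_s a m' hm'
    rw [hget, hget']
    by_cases hne : pvKey a ((pvS a)[m' + 1]) = pvKey a ((pvS a)[m'])
    · rw [if_neg (by simp [hne])]
      unfold pvR
      rw [if_neg (Nat.succ_ne_zero m'), hget']
      exact pvCC_congr a _ _ hne.symm
    · rw [if_pos ⟨by positivity, hne⟩]
      refine (pvCC_getElem_eq a (m' + 1) hm ?_).symm
      intro q hq
      have h1 : pvKey a ((pvS a)[q]'(hq.trans hm)) ≤ pvKey a ((pvS a)[m']) :=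
        pvS_mono a q m' (by omega) hm'
      have h2 : pvKey a ((pvS a)[m']) ≤ pvKey a ((pvS a)[m' + 1]) :=
        pvS_mono a m' (m' + 1) (by omega) hm
      have h3 : pvKey a ((pvS a)[m']) ≠ pvKey a ((pvS a)[m' + 1]) := fun h => hne h.symm
      exact lt_of_le_of_lt h1 (lt_of_le_of_ne h2 h3)

theorem pvLoop (a : List Int) (m : Nat) (hm : m ≤ a.length) :
    (PySem.List.pyRange 0 (m : Int) 1).foldl
      (fun (st : Int × List Int) i =>
        let r : Int :=
          if i > 0 ∧ ¬ (PySem.List.pyGetD a (PySem.List.pyGetD (pvS a) i 0) 0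
                        = PySem.List.pyGetD a (PySem.List.pyGetD (pvS a) (i - 1) 0) 0)
          then i else st.1
        (r, PySem.List.pySetD st.2 (PySem.List.pyGetD (pvS a) i 0) r))
      (0, List.replicate a.length 0)
    = (pvR a m,
       (List.range a.length).map
         (fun j : Nat => if ((j : Int)) ∈ (pvS a).take m then pvCC a (j : Int) else 0)) := by
  induction m with
  | zero =>
    rw [show ((0 : Nat) : Int) = 0 by norm_num, PySem.List.pyRange_one_eq_nil (by norm_num)]
    simp [pvR, List.foldl_nil, List.map_const']
  | succ m ih =>
    have hmlt : m < a.length := by omega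
    have hms : m < (pvS a).length := by rw [pvS_length]; exact hmlt
    rw [show ((m + 1 : Nat) : Int) = (m : Int) + 1 by push_cast; ring,
      PySem.List.pyRange_one_succ_right (by positivity), List.foldl_append,
      ih (by omega), List.foldl_cons, List.foldl_nil]
    have hr : (if (m : Int) > 0 ∧ ¬ (PySem.List.pyGetD a (PySem.List.pyGetD (pvS a) (m : Int) 0) 0
                  = PySem.List.pyGetD a (PySem.List.pyGetD (pvS a) ((m : Int) - 1) 0) 0)
               then (m : Int) else pvR a m) = pvCC a ((pvS a)[m]) := pvR_step a m hms
    simp only []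
    rw [hr, pvGetD_s a m hms]
    have hnn : 0 ≤ (pvS a)[m] := ((pvS_mem a _).1 (List.getElem_mem hms)).1
    have hlt : ((pvS a)[m]).toNat < a.length := by
      have := ((pvS_mem a _).1 (List.getElem_mem hms)).2
      omega
    rw [Prod.mk.injEq]
    constructor
    · exact (pvR_succ_eq a m hms).symm
    rw [PySem.List.pySetD_of_nonneg _ _ hnn]
    apply List.ext_getElem
    · simp
    intro j hj1 hj2
    simp only [List.length_set, List.length_map, List.length_range] at hj1
    have hjlen : j < a.length := hj1
    rw [List.getElem_set]
    rw [List.getElem_map, List.getElem_range]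
    have htake : (pvS a).take (m + 1) = (pvS a).take m ++ [(pvS a)[m]] := by
      rw [List.take_add_one, List.getElem?_eq_getElem hms]
      rfl
    have hmemiff : ∀ j : Nat, (((j : Int)) ∈ (pvS a).take (m + 1)
        ↔ ((j : Int)) ∈ (pvS a).take m ∨ (j : Int) = (pvS a)[m]) := by
      intro j; rw [htake, List.mem_append, List.mem_singleton]
    by_cases hij : ((pvS a)[m]).toNat = j
    · rw [if_pos hij]
      have hji : (j : Int) = (pvS a)[m] := by omega
      simp only [List.getElem_map, List.getElem_range]
      rw [if_pos ((hmemiff j).2 (Or.inr hji)), hji]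
    · rw [if_neg hij]
      simp only [List.getElem_map, List.getElem_range]
      have hji : (j : Int) ≠ (pvS a)[m] := by omega
      by_cases hmem : (j : Int) ∈ (pvS a).take m
      · rw [if_pos hmem, if_pos ((hmemiff j).2 (Or.inl hmem))]
      · rw [if_neg hmem, if_neg (fun hc => (hmemiff j).1 hc |>.elim hmem hji)]

theorem pvRank (a : List Int) :
    ((PySem.List.pyRange 0 ((a.length : Nat) : Int) 1).foldl
      (fun (st : Int × List Int) i =>
        let r : Int :=
          if i > 0 ∧ ¬ (PySem.List.pyGetD a (PySem.List.pyGetD (pvS a) i 0) 0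
                        = PySem.List.pyGetD a (PySem.List.pyGetD (pvS a) (i - 1) 0) 0)
          then i else st.1
        (r, PySem.List.pySetD st.2 (PySem.List.pyGetD (pvS a) i 0) r))
      (0, List.replicate a.length 0)).2
    = a.map (fun v => ((a.countP (fun x => decide (x < v)) : Nat) : Int)) := by
  rw [pvLoop a a.length (le_refl _)]
  apply List.ext_getElem
  · simp
  intro j hj1 hj2
  simp only [List.length_map, List.length_range] at hj1
  simp only [List.getElem_map, List.getElem_range]
  have hmem : ((j : Int)) ∈ (pvS a).take a.length := by
    rw [List.take_of_length_le (le_of_eq (pvS_length a))]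
    exact (pvS_mem a _).2 ⟨by positivity, by exact_mod_cast hj1⟩
  rw [if_pos hmem, pvCC_eq_countP]
  have hkey : pvKey a ((j : Int)) = a[j] := by
    unfold pvKey
    rw [PySem.List.pyGetD_natCast]
    exact List.getD_eq_getElem _ _ hj1
  rw [hkey]

theorem ranking_eq (a : List Int) :
    ranking a = PySem.Str.join " "
      (a.map (fun v => PySem.Int.toStr
        (a.foldl (fun acc x => if x < v then acc + 1 else acc) (0 : Int)))) := by
  show PySem.Str.join " "
      (((PySem.List.pyRange 0 ((a.length : Nat) : Int) 1).foldl
        (fun (st : Int × List Int) i =>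
          let r : Int :=
            if i > 0 ∧ ¬ (PySem.List.pyGetD a (PySem.List.pyGetD (pvS a) i 0) 0
                          = PySem.List.pyGetD a (PySem.List.pyGetD (pvS a) (i - 1) 0) 0)
            then i else st.1
          (r, PySem.List.pySetD st.2 (PySem.List.pyGetD (pvS a) i 0) r))
        (0, List.replicate a.length 0)).2.map PySem.Int.toStr) = _
  rw [pvRank, List.map_map]
  congr 1
  apply List.map_congr_left
  intro v hv
  simp [PySem.List.foldl_ite_add_one]

theorem pvDict_eq (arr : List (List Int)) (g : List Int → String) :
    arr.foldl
      (fun (d : PySem.Dict String Int) i =>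
        if d.contains (g i) then d.insert (g i) (d.getD (g i) 0 + 1)
        else d.insert (g i) 1)
      PySem.Dict.empty = PySem.Dict.counter (arr.map g) := by
  rw [← PySem.Dict.foldl_insert_getD_add_one_eq_counter, List.foldl_map]
  apply PySem.List.foldl_congr_mem
  intro d i _
  by_cases h : d.contains (g i)
  · rw [if_pos h]
  · rw [if_neg h, PySem.Dict.getD_of_not_contains d 0 (by simpa using h)]
    norm_num

theorem pvValues_pos (X : List String) (w : Int) (hw : w ∈ (PySem.Dict.counter X).values) :
    1 ≤ w := by
  have hv : (PySem.Dict.counter X).values = (PySem.Dict.counter X).items.map Prod.snd := rfl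
  rw [hv, PySem.Dict.items_counter, List.map_map] at hw
  simp only [List.mem_map, Function.comp] at hw
  obtain ⟨k, hk, rfl⟩ := hw
  have : k ∈ X := (PySem.Set.mem_ofList X k).1 hk
  have : 1 ≤ X.count k := List.count_pos_iff.2 this
  exact_mod_cast this

theorem pvSum_eq (d : PySem.Dict String Int) (hpos : ∀ w ∈ d.values, 1 ≤ w) :
    d.values.foldl
      (fun result i => if i ≥ 2 then result + PySem.Int.floordiv (i * (i - 1)) 2 else result) 0
    = (d.values.map (fun c => PySem.Int.floordiv (c * (c - 1)) 2)).sum := by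
  rw [PySem.List.foldl_congr_mem _ _
      (fun result i => result + PySem.Int.floordiv (i * (i - 1)) 2) 0 ?_,
    PySem.List.foldl_add, zero_add]
  intro res v hv
  have h1 : 1 ≤ v := hpos v hv
  by_cases h2 : v ≥ 2
  · rw [if_pos h2]
  · rw [if_neg h2]
    have : v = 1 := by omega
    subst this
    norm_num [PySem.Int.floordiv]

def pvKeyB (a : List Int) : String :=
  PySem.Str.join " "
    (a.map (fun v => PySem.Int.toStr
      (a.foldl (fun acc x => if x < v then acc + 1 else acc) (0 : Int))))

theorem pvDictB_eq (arr : List (List Int)) (g : List Int → String) :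
    arr.foldl
      (fun (d : PySem.Dict String Int) a => d.insert (g a) (d.getD (g a) 0 + 1))
      PySem.Dict.empty = PySem.Dict.counter (arr.map g) := by
  rw [← PySem.Dict.foldl_insert_getD_add_one_eq_counter, List.foldl_map]

theorem answer_spec' (arr : List (List Int)) : answer arr = answer_alt arr := by
  show ((arr.foldl
      (fun (d : PySem.Dict String Int) i =>
        if d.contains (ranking i) then d.insert (ranking i) (d.getD (ranking i) 0 + 1)
        else d.insert (ranking i) 1)
      PySem.Dict.empty).values.foldl
      (fun result i => if i ≥ 2 then result + PySem.Int.floordiv (i * (i - 1)) 2 else result) 0)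
    = (((arr.foldl
      (fun (d : PySem.Dict String Int) a => d.insert (pvKeyB a) (d.getD (pvKeyB a) 0 + 1))
      PySem.Dict.empty).values.map (fun c => PySem.Int.floordiv (c * (c - 1)) 2)).sum)
  rw [pvDict_eq arr ranking, pvDictB_eq arr pvKeyB,
    show ranking = pvKeyB from funext (fun a => ranking_eq a)]
  exact pvSum_eq _ (fun w hw => pvValues_pos _ w hw)

-- ===== VERDICT (by name: the statement is the Claim_ definition above) =====
theorem answer_spec : Claim_equal_answer := by
  intro arr _
  unfold Spec_answer
  exact answer_spec' arr
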